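-- pv_equiv track=rewrite | github.com/CserYe03na/DS-Interviewer-MultiAgent | scripts/extract_sql_raw.py | clean_description
-- ===== SOURCE A (Python) =====
-- def clean_description(raw: str) -> str:
--     lines = raw.splitlines()
--
--     # Remove first line like "-- Question ..."
--     if lines and lines[0].strip().startswith("--"):
--         lines = lines[1:]
--
--     cleaned = []
--     in_solution = False
--
--     for raw_line in lines:
--         line = raw_line.strip()
--
--         # skip solution section
--         if line.lower().startswith("solution") or "solution:" in line.lower():
--             in_solution = True
--             continue
--         if in_solution:
--             continue
--
--         # remove "--" prefix
--         if line.startswith("--"):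
--             line = line[2:].strip()
--
--         if not line:
--             continue
--
--         # remove ascii table lines
--         if line.startswith("|") or line.startswith("+"):
--             continue
--
--         # remove markdown table header
--         if "|" in line and ("--" in line or "---" in line):
--             continue
--
--         # remove schema lines
--         blacklist = [
--             "create table", "primary key",
--             "column name", "type", "table "
--         ]
--         if any(k in line.lower() for k in blacklist):
--             continue
--
--         cleaned.append(line)
--
--     return "\n".join(cleaned).strip()
-- ===== SOURCE B (Python) =====
-- _BLACKLIST = ["create table", "primary key", "column name", "type", "table "]
--
--
-- def clean_description(raw: str) -> str:
--     lines = raw.splitlines()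
--     if lines and lines[0].strip().startswith("--"):
--         lines = lines[1:]
--     # Single right-to-left pass: a solution marker line resets the accumulator,
--     # which discards everything that came after it; the last (leftmost) marker
--     # wins, so only lines before the first marker survive.
--     kept = []  # in reverse order
--     for raw_line in reversed(lines):
--         s = raw_line.strip()
--         low = s.lower()
--         if low.startswith("solution") or "solution:" in low:
--             kept = []
--             continue
--         line = s[2:].strip() if s.startswith("--") else s
--         if (line
--                 and not (line.startswith("|") or line.startswith("+"))
--                 and not ("|" in line and ("--" in line or "---" in line))
--                 and not any(k in line.lower() for k in _BLACKLIST)):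
--             kept.append(line)
--     return "\n".join(reversed(kept)).strip()
-- ===== Notes on version B (the rewrite author's own statement) =====
-- stated objective: alternative
-- what changed: Replaces A's left-to-right loop with an in_solution flag by a single right-to-left pass whose accumulator is reset at each solution-marker line (the leftmost marker resets last, so exactly the lines before the first marker survive), with the per-line skip checks merged into one keep-condition.
import Mathlib
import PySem

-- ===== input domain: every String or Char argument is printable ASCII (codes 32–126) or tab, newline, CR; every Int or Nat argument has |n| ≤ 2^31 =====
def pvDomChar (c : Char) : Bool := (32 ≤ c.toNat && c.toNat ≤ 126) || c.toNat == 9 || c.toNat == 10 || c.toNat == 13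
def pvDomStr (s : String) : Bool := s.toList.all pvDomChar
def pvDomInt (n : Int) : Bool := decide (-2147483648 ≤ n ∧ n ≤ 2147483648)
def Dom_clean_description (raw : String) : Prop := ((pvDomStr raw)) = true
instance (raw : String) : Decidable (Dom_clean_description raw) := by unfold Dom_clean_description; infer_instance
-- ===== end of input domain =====

-- B replaces A's left-to-right loop with an in_solution flag by a single right-to-left pass
-- whose accumulator is reset at each solution-marker line (the leftmost marker resets last,
-- so exactly the lines before the first marker survive); objective: alternative, same cost.

-- ===== PORT A =====
-- the loop over lines, state = (accumulated cleaned lines, in_solution flag)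
def cdLoopA : List String → List String → Bool → List String
  | [], cleaned, _ => cleaned
  | raw_line :: rest, cleaned, in_solution =>
    let line := PySem.Str.strip raw_line
    if PySem.Str.startswith (PySem.Str.lower line) "solution"
        || PySem.Str.isIn "solution:" (PySem.Str.lower line) then
      cdLoopA rest cleaned true
    else if in_solution then
      cdLoopA rest cleaned in_solution
    else
      let line := if PySem.Str.startswith line "--"
                  then PySem.Str.strip (PySem.Str.slice line (some 2) none) else line
      if line == "" then cdLoopA rest cleaned in_solution
      else if PySem.Str.startswith line "|" || PySem.Str.startswith line "+" then
        cdLoopA rest cleaned in_solution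
      else if PySem.Str.isIn "|" line
          && (PySem.Str.isIn "--" line || PySem.Str.isIn "---" line) then
        cdLoopA rest cleaned in_solution
      else if ["create table", "primary key", "column name", "type", "table "].any
          (fun k => PySem.Str.isIn k (PySem.Str.lower line)) then
        cdLoopA rest cleaned in_solution
      else cdLoopA rest (cleaned ++ [line]) in_solution

def clean_description (raw : String) : String :=
  let lines := PySem.Str.splitlines raw
  let lines := if lines ≠ [] ∧ PySem.Str.startswith (PySem.Str.strip lines[0]!) "--"
               then lines.drop 1 else lines
  PySem.Str.strip (PySem.Str.join "\n" (cdLoopA lines [] false))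

-- ===== PORT B =====
-- one step of B's backward loop: reset on a solution marker, else keep the cleaned line if it passes
def cdStepB (kept : List String) (raw_line : String) : List String :=
  let s := PySem.Str.strip raw_line
  let low := PySem.Str.lower s
  if PySem.Str.startswith low "solution" || PySem.Str.isIn "solution:" low then []
  else
    let line := if PySem.Str.startswith s "--"
                then PySem.Str.strip (PySem.Str.slice s (some 2) none) else s
    if !(line == "")
        && !(PySem.Str.startswith line "|" || PySem.Str.startswith line "+")
        && !(PySem.Str.isIn "|" line
              && (PySem.Str.isIn "--" line || PySem.Str.isIn "---" line))
        && !(["create table", "primary key", "column name", "type", "table "].any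
              (fun k => PySem.Str.isIn k (PySem.Str.lower line))) then
      kept ++ [line]
    else kept

-- the 'for raw_line in reversed(lines)' loop
def cdLoopB : List String → List String → List String
  | [], kept => kept
  | l :: rest, kept => cdLoopB rest (cdStepB kept l)

def clean_description_alt (raw : String) : String :=
  let lines := PySem.Str.splitlines raw
  let lines := if lines ≠ [] ∧ PySem.Str.startswith (PySem.Str.strip lines[0]!) "--"
               then lines.drop 1 else lines
  PySem.Str.strip (PySem.Str.join "\n" ((cdLoopB lines.reverse []).reverse))

-- ===== PRECONDITION & SPEC =====
def Spec_clean_description (raw : String) (out : String) : Prop := out = clean_description_alt raw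
instance (raw : String) (out : String) : Decidable (Spec_clean_description raw out) := by unfold Spec_clean_description; infer_instance

-- ===== CLAIM (what is proved, stated in full; the proofs are below) =====
def Claim_equal_clean_description : Prop := ∀ (raw : String), Dom_clean_description raw → Spec_clean_description raw (clean_description raw)

-- ===== LEMMAS AND PROOFS =====

-- once in_solution is set, A's loop appends nothing
lemma cdLoopA_true (ls : List String) (acc : List String) : cdLoopA ls acc true = acc := by
  induction ls with
  | nil => rfl
  | cons l rest ih => simp only [cdLoopA]; split_ifs <;> exact ih

-- A's accumulator only grows at the end (in_solution = false)
lemma cdLoopA_acc (ls : List String) (acc : List String) :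
    cdLoopA ls acc false = acc ++ cdLoopA ls [] false := by
  induction ls generalizing acc with
  | nil => simp [cdLoopA]
  | cons l rest ih =>
    simp only [cdLoopA, Bool.false_eq_true, if_false]
    split_ifs <;>
      first
        | rw [cdLoopA_true, cdLoopA_true, List.append_nil]
        | exact ih acc
        | (rw [ih (acc ++ _), ih ([] ++ _)]; simp [List.append_assoc])

-- B's loop is a fold; processing one more element on the left of the reversed list
lemma cdLoopB_append (xs : List String) (l : String) (kept : List String) :
    cdLoopB (xs ++ [l]) kept = cdStepB (cdLoopB xs kept) l := by
  induction xs generalizing kept with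
  | nil => rfl
  | cons x rest ih => simp [cdLoopB, ih]

-- the two loops compute the same list of kept lines
lemma cdLoop_agree (ls : List String) :
    cdLoopA ls [] false = (cdLoopB ls.reverse []).reverse := by
  induction ls with
  | nil => rfl
  | cons l rest ih =>
    rw [List.reverse_cons, cdLoopB_append]
    simp only [cdLoopA, cdStepB, Bool.false_eq_true, if_false]
    by_cases hs : (PySem.Str.startswith (PySem.Str.lower (PySem.Str.strip l)) "solution"
        || PySem.Str.isIn "solution:" (PySem.Str.lower (PySem.Str.strip l))) = true
    · rw [if_pos hs, if_pos hs, cdLoopA_true, List.reverse_nil]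
    · rw [if_neg hs, if_neg hs]
      generalize (if PySem.Str.startswith (PySem.Str.strip l) "--" = true
          then PySem.Str.strip (PySem.Str.slice (PySem.Str.strip l) (some 2) none)
          else PySem.Str.strip l) = t
      cases h1 : (t == "") <;>
        cases h2 : (PySem.Str.startswith t "|" || PySem.Str.startswith t "+") <;>
        cases h3 : (PySem.Str.isIn "|" t
            && (PySem.Str.isIn "--" t || PySem.Str.isIn "---" t)) <;>
        cases h4 : (["create table", "primary key", "column name", "type", "table "].any
            (fun k => PySem.Str.isIn k (PySem.Str.lower t))) <;>
        simp only [h1, h2, h3, h4, Bool.not_true, Bool.not_false, Bool.and_true,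
          Bool.and_false, Bool.false_eq_true, if_false, if_true, List.nil_append] <;>
        first
          | exact ih
          | (rw [cdLoopA_acc rest [t], ih, List.reverse_append, List.reverse_cons,
              List.reverse_nil]; rfl)

-- ===== VERDICT (by name: the statement is the Claim_ definition above) =====
theorem clean_description_spec : Claim_equal_clean_description := by
  intro raw _
  unfold Spec_clean_description clean_description clean_description_alt
  simp only [cdLoop_agree]
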